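-- pv_equiv track=rewrite | github.com/Shaikh-Zaid4885/frameshift-server2 | python/accuracy/templates_accuracy_improver.py | _convert_date_format
-- ===== SOURCE A (Python) =====
-- def _convert_date_format(django_format: str) -> str:
--     """Convert Django date format to Python strftime format"""
--     conversions = {
--         'Y': '%Y',  # 4-digit year
--         'y': '%y',  # 2-digit year
--         'm': '%m',  # Month
--         'd': '%d',  # Day
--         'H': '%H',  # Hour 24
--         'h': '%I',  # Hour 12
--         'i': '%M',  # Minute
--         's': '%S',  # Second
--         'A': '%p',  # AM/PM
--         'b': '%b',  # Month abbrev
--         'B': '%B',  # Month full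
--         'a': '%a',  # Day abbrev
--         'E': '%A',  # Day full
--     }
--
--     result = django_format
--     for django_char, strftime_char in conversions.items():
--         result = result.replace(django_char, strftime_char)
--
--     return result
-- ===== SOURCE B (Python) =====
-- def _convert_date_format(django_format: str) -> str:
--     """Convert Django date format to Python strftime format"""
--     conversions = {
--         'Y': '%Y',  # 4-digit year
--         'y': '%y',  # 2-digit year
--         'm': '%m',  # Month
--         'd': '%d',  # Day
--         'H': '%H',  # Hour 24
--         'h': '%I',  # Hour 12
--         'i': '%M',  # Minute
--         's': '%S',  # Second
--         'A': '%p',  # AM/PM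
--         'b': '%b',  # Month abbrev
--         'B': '%B',  # Month full
--         'a': '%a',  # Day abbrev
--         'E': '%A',  # Day full
--     }
--     return ''.join(conversions.get(c, c) for c in django_format)
-- ===== Notes on version B (the rewrite author's own statement) =====
-- stated objective: simpler
-- what changed: Replaces thirteen sequential full-string .replace passes with a single character-wise pass that maps each character through the conversions dict (default: the character itself) and joins the results; this is equivalent because no inserted strftime character is itself a later-processed key.
import Mathlib
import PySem

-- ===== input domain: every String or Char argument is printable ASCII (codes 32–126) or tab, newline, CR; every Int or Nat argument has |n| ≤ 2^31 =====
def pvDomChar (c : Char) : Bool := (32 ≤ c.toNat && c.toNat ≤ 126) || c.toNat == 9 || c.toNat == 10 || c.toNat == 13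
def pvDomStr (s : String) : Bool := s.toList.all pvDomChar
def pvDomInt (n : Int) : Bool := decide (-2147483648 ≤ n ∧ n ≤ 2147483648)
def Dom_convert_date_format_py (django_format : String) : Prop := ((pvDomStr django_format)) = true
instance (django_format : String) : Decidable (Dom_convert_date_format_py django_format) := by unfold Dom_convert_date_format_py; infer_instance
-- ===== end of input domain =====

-- B rewrites A's thirteen sequential full-string replace passes as one character-wise
-- pass through the same conversions dict (objective: simpler).

-- ===== PORT A =====
-- the conversions dict, in insertion order, as A's loop iterates conversions.items()
def pvConversionsA : List (String × String) :=
  [("Y", "%Y"), ("y", "%y"), ("m", "%m"), ("d", "%d"), ("H", "%H"), ("h", "%I"),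
   ("i", "%M"), ("s", "%S"), ("A", "%p"), ("b", "%b"), ("B", "%B"), ("a", "%a"), ("E", "%A")]

def convert_date_format_py (django_format : String) : String :=
  pvConversionsA.foldl (fun result p => PySem.Str.replace result p.1 p.2) django_format

-- ===== PORT B =====
-- the same conversions dict, keyed by the single character each key consists of
def pvConversionsB : PySem.Dict Char String :=
  ⟨[('Y', "%Y"), ('y', "%y"), ('m', "%m"), ('d', "%d"), ('H', "%H"), ('h', "%I"),
    ('i', "%M"), ('s', "%S"), ('A', "%p"), ('b', "%b"), ('B', "%B"), ('a', "%a"), ('E', "%A")]⟩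

-- ''.join(conversions.get(c, c) for c in django_format): join on "" is concatenation,
-- ported character-exactly as flatMap of the looked-up replacement strings
def convert_date_format_py_alt (django_format : String) : String :=
  String.ofList (django_format.toList.flatMap
    (fun c => (PySem.Dict.getD pvConversionsB c (String.ofList [c])).toList))

-- ===== PRECONDITION & SPEC =====
def Spec_convert_date_format_py (django_format : String) (out : String) : Prop := out = convert_date_format_py_alt django_format
instance (django_format : String) (out : String) : Decidable (Spec_convert_date_format_py django_format out) := by unfold Spec_convert_date_format_py; infer_instance

-- ===== CLAIM (what is proved, stated in full; the proofs are below) =====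
def Claim_equal_convert_date_format_py : Prop := ∀ (django_format : String), Dom_convert_date_format_py django_format → Spec_convert_date_format_py django_format (convert_date_format_py django_format)

-- ===== LEMMAS AND PROOFS =====

-- B's per-character lookup, on the list side
def pvConvB (c : Char) : List Char :=
  (PySem.Dict.getD pvConversionsB c (String.ofList [c])).toList

-- replace's worker with a single-character pattern is a flatMap
lemma replace_go_single (k : Char) (new : List Char) :
    ∀ (l acc : List Char) (fuel : Nat), l.length ≤ fuel →
      PySem.Chars.replace.go [k] new fuel l acc =
        acc.reverse ++ l.flatMap (fun c => if c = k then new else [c]) := by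
  intro l
  induction l with
  | nil =>
    intro acc fuel _
    cases fuel <;> simp [PySem.Chars.replace.go]
  | cons c t ih =>
    intro acc fuel h
    cases fuel with
    | zero => simp at h
    | succ f =>
      simp only [PySem.Chars.replace.go, List.isPrefixOf, Bool.and_true]
      by_cases hc : c = k
      · simp only [hc, beq_self_eq_true, if_pos, List.length_cons, List.length_nil,
          List.drop_succ_cons, List.drop_zero]
        rw [ih (new.reverse ++ acc) f (by simpa using Nat.le_of_succ_le_succ h)]
        simp
      · have hk : (k == c) = false := by simp [beq_eq_false_iff_ne]; exact fun e => hc e.symm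
        simp only [hk, Bool.false_eq_true, if_neg, not_false_iff]
        rw [ih (c :: acc) f (by simpa using Nat.le_of_succ_le_succ h)]
        simp [hc]

-- replace with a single-character pattern is a flatMap
lemma replace_single (s : List Char) (k : Char) (new : List Char) :
    PySem.Chars.replace s [k] new = s.flatMap (fun c => if c = k then new else [c]) := by
  simp only [PySem.Chars.replace, List.isEmpty_cons, Bool.false_eq_true, if_neg,
    not_false_iff]
  simpa using replace_go_single k new s [] s.length le_rfl

-- the thirteen sequential single-character stages agree with B's lookup on every character
lemma stages_eq_convB (c : Char) :
    List.flatMap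
      (fun x =>
        List.flatMap
          (fun x =>
            List.flatMap
              (fun x =>
                List.flatMap
                  (fun x =>
                    List.flatMap
                      (fun x =>
                        List.flatMap
                          (fun x =>
                            List.flatMap
                              (fun x =>
                                List.flatMap
                                  (fun x =>
                                    List.flatMap
                                      (fun x =>
                                        List.flatMap
                                          (fun x =>
                                            List.flatMap
                                              (fun x =>
                                                List.flatMap (fun c => if c = 'E' then "%A".toList else [c])
                                                  (if x = 'a' then "%a".toList else [x]))
                                              (if x = 'B' then "%B".toList else [x]))
                                          (if x = 'b' then "%b".toList else [x]))
                                      (if x = 'A' then "%p".toList else [x]))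
                                  (if x = 's' then "%S".toList else [x]))
                              (if x = 'i' then "%M".toList else [x]))
                          (if x = 'h' then "%I".toList else [x]))
                      (if x = 'H' then "%H".toList else [x]))
                  (if x = 'd' then "%d".toList else [x]))
              (if x = 'm' then "%m".toList else [x]))
          (if x = 'y' then "%y".toList else [x]))
      (if c = 'Y' then "%Y".toList else [c]) = pvConvB c := by
  by_cases h1 : c = 'Y'; · subst h1; decide
  by_cases h2 : c = 'y'; · subst h2; decide
  by_cases h3 : c = 'm'; · subst h3; decide
  by_cases h4 : c = 'd'; · subst h4; decide
  by_cases h5 : c = 'H'; · subst h5; decide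
  by_cases h6 : c = 'h'; · subst h6; decide
  by_cases h7 : c = 'i'; · subst h7; decide
  by_cases h8 : c = 's'; · subst h8; decide
  by_cases h9 : c = 'A'; · subst h9; decide
  by_cases h10 : c = 'b'; · subst h10; decide
  by_cases h11 : c = 'B'; · subst h11; decide
  by_cases h12 : c = 'a'; · subst h12; decide
  by_cases h13 : c = 'E'; · subst h13; decide
  have b : ∀ k : Char, c ≠ k → (k == c) = false := by
    intro k hk; simp [beq_eq_false_iff_ne]; exact fun e => hk e.symm
  simp [pvConvB, pvConversionsB, PySem.Dict.getD, PySem.Dict.get?, List.find?,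
    h1, h2, h3, h4, h5, h6, h7, h8, h9, h10, h11, h12, h13,
    b _ h1, b _ h2, b _ h3, b _ h4, b _ h5, b _ h6, b _ h7, b _ h8, b _ h9, b _ h10,
    b _ h11, b _ h12, b _ h13]

-- ===== VERDICT (by name: the statement is the Claim_ definition above) =====
set_option maxHeartbeats 1000000 in
theorem convert_date_format_py_spec : Claim_equal_convert_date_format_py := by
  intro df _
  unfold Spec_convert_date_format_py convert_date_format_py convert_date_format_py_alt
    pvConversionsA
  apply String.ext
  simp only [List.foldl_cons, List.foldl_nil, PySem.Str.toList_replace,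
    String.toList_ofList]
  simp only [show ("Y" : String).toList = ['Y'] from rfl, show ("y" : String).toList = ['y'] from rfl,
    show ("m" : String).toList = ['m'] from rfl, show ("d" : String).toList = ['d'] from rfl,
    show ("H" : String).toList = ['H'] from rfl, show ("h" : String).toList = ['h'] from rfl,
    show ("i" : String).toList = ['i'] from rfl, show ("s" : String).toList = ['s'] from rfl,
    show ("A" : String).toList = ['A'] from rfl, show ("b" : String).toList = ['b'] from rfl,
    show ("B" : String).toList = ['B'] from rfl, show ("a" : String).toList = ['a'] from rfl,
    show ("E" : String).toList = ['E'] from rfl, replace_single]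
  simp only [List.flatMap_assoc]
  refine List.flatMap_congr ?_
  intro c _
  simpa [pvConvB] using stages_eq_convB c
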